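-- pv_equiv track=rewrite | github.com/Alexrobertson12/Programming-Algorithms-and-Data-Structures-Coursework | PerfectSquare Week 2 Coursework.py | highestPerfectSquare
-- ===== SOURCE A (Python) =====
-- def highestPerfectSquare(A):
--     Squares = []
--     b = 1
--     for i in range(A):
--         c = b**2
--         b = b + 1
--         if c <= A:
--             Squares.append(c)
--             perfectSquare = Squares[len(Squares)-1]
--         else:
--             pass
--     return perfectSquare
-- ===== SOURCE B (Python) =====
-- def highestPerfectSquare(A):
--     lo = 1
--     hi = A
--     while lo <= hi:
--         mid = (lo + hi) // 2
--         if mid**2 <= A: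
--             result = mid**2
--             lo = mid + 1
--         else:
--             hi = mid - 1
--     return result
-- ===== Notes on version B (the rewrite author's own statement) =====
-- stated objective: faster
-- what changed: Replaces the O(A)-iteration linear scan that appends every square up to A with a binary search for the largest b with b*b <= A, keeping the result variable unbound when the loop never runs.
-- outside the precondition, e.g. on highestPerfectSquare(0): A raises UnboundLocalError, B raises UnboundLocalError
import Mathlib
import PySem

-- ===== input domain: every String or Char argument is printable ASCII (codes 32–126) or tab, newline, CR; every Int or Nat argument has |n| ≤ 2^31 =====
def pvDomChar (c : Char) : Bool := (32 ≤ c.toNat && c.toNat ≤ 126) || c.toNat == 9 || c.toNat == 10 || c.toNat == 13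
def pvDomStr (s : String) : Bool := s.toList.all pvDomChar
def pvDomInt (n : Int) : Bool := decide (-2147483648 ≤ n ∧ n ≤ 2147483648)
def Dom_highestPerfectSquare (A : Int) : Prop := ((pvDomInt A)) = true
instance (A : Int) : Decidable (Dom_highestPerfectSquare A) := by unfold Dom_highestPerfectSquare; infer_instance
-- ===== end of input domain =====

-- B replaces A's linear scan over range(A) with a binary search for the largest b with b^2 ≤ A (faster in a timing run).

-- ===== PORT A =====
-- Loop state: remaining iterations, current b, Squares list, perfectSquare (none = still unbound).
def hpsLoopA (A : Int) : Nat → Int → List Int → Option Int → Option Int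
  | 0, _, _, ps => ps
  | n + 1, b, sq, ps =>
    let c := b ^ 2
    let b' := b + 1
    if c ≤ A then
      let sq' := sq ++ [c]
      hpsLoopA A n b' sq' (PySem.List.pyGet? sq' ((sq'.length : Int) - 1))
    else
      hpsLoopA A n b' sq ps

-- returning the unbound variable raises UnboundLocalError in Python; that case (ps = none, i.e. A ≤ 0) is excluded by Pre_
def highestPerfectSquare (A : Int) : Int :=
  (hpsLoopA A A.toNat 1 [] none).getD 0

-- ===== PORT B =====
-- Loop state: fuel (the while loop runs at most A.toNat + 1 tests), lo, hi, result (none = unbound).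
def hpsLoopB (A : Int) : Nat → Int → Int → Option Int → Option Int
  | 0, _, _, res => res
  | fuel + 1, lo, hi, res =>
    if lo ≤ hi then
      let mid := PySem.Int.floordiv (lo + hi) 2
      if mid ^ 2 ≤ A then
        hpsLoopB A fuel (mid + 1) hi (some (mid ^ 2))
      else
        hpsLoopB A fuel lo (mid - 1) res
    else
      res

def highestPerfectSquare_alt (A : Int) : Int :=
  (hpsLoopB A (A.toNat + 1) 1 A none).getD 0

-- ===== PRECONDITION & SPEC =====
-- Pre_ excludes exactly A ≤ 0, where the Python A raises UnboundLocalError (perfectSquare is never assigned).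
def Pre_highestPerfectSquare (A : Int) : Prop := 1 ≤ A
instance (A : Int) : Decidable (Pre_highestPerfectSquare A) := by unfold Pre_highestPerfectSquare; infer_instance
def pvWitness_highestPerfectSquare : Int := 10

def Spec_highestPerfectSquare (A : Int) (out : Int) : Prop := out = highestPerfectSquare_alt A
instance (A : Int) (out : Int) : Decidable (Spec_highestPerfectSquare A out) := by unfold Spec_highestPerfectSquare; infer_instance

-- ===== CLAIM (what is proved, stated in full; the proofs are below) =====
def Claim_equal_highestPerfectSquare : Prop := ∀ (A : Int), Dom_highestPerfectSquare A → Pre_highestPerfectSquare A → Spec_highestPerfectSquare A (highestPerfectSquare A)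

-- ===== LEMMAS AND PROOFS =====

theorem hpsLoopA_stop (A s : Int) (hs0 : 0 ≤ s) (hA : A < (s + 1) ^ 2) :
    ∀ (n : Nat) (b : Int) (sq : List Int) (ps : Option Int), s < b →
      hpsLoopA A n b sq ps = ps := by
  intro n
  induction n with
  | zero => intro b sq ps _; rfl
  | succ m ih =>
    intro b sq ps hb
    have hc : ¬ b ^ 2 ≤ A := by
      nlinarith [mul_nonneg (show (0:Int) ≤ b - (s + 1) by omega)
        (show (0:Int) ≤ b + s + 1 by omega)]
    simp only [hpsLoopA, if_neg hc]
    exact ih (b + 1) sq ps (by omega)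

theorem hpsLoopA_run (A s : Int) (hs2 : s ^ 2 ≤ A) (hA : A < (s + 1) ^ 2) :
    ∀ (n : Nat) (b : Int) (sq : List Int) (ps : Option Int),
      1 ≤ b → b ≤ s → (s - b).toNat < n →
      hpsLoopA A n b sq ps = some (s ^ 2) := by
  intro n
  induction n with
  | zero => intro b sq ps _ _ h; omega
  | succ m ih =>
    intro b sq ps hb1 hbs hn
    have hc : b ^ 2 ≤ A := by nlinarith
    simp only [hpsLoopA, if_pos hc]
    have hget : PySem.List.pyGet? (sq ++ [b ^ 2]) (((sq ++ [b ^ 2]).length : Int) - 1) =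
        some (b ^ 2) := by
      have hidx : (((sq ++ [b ^ 2]).length : Int) - 1) = (sq.length : Int) := by
        simp
      rw [hidx]
      simp
    rw [hget]
    rcases lt_or_eq_of_le hbs with hlt | heq
    · exact ih (b + 1) (sq ++ [b ^ 2]) (some (b ^ 2)) (by omega) (by omega) (by omega)
    · subst heq
      exact hpsLoopA_stop A b (by omega) hA m (b + 1) (sq ++ [b ^ 2]) (some (b ^ 2)) (by omega)

theorem hpsLoopB_run (A s : Int) (hs1 : 1 ≤ s) (hs2 : s ^ 2 ≤ A) (hA : A < (s + 1) ^ 2) :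
    ∀ (fuel : Nat) (lo hi : Int) (res : Option Int),
      1 ≤ lo → lo ≤ s + 1 → s ≤ hi →
      res = (if lo = 1 then none else some ((lo - 1) ^ 2)) →
      (hi - lo + 1).toNat ≤ fuel →
      hpsLoopB A fuel lo hi res = some (s ^ 2) := by
  intro fuel
  induction fuel with
  | zero =>
    intro lo hi res h1 h2 h3 hres hf
    have hlo : lo = s + 1 := by omega
    subst hlo
    simp only [hpsLoopB, hres, if_neg (by omega : ¬ s + 1 = 1)]
    norm_num
  | succ f ih =>
    intro lo hi res h1 h2 h3 hres hf
    by_cases hle : lo ≤ hi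
    · simp only [hpsLoopB, if_pos hle]
      obtain ⟨hm1, hm2⟩ := PySem.Int.floordiv_two_mid_bounds hle
      set mid := PySem.Int.floordiv (lo + hi) 2 with hmid
      by_cases hsq : mid ^ 2 ≤ A
      · have hms : mid ≤ s := by nlinarith
        simp only [if_pos hsq]
        exact ih (mid + 1) hi (some (mid ^ 2)) (by omega) (by omega) h3
          (by rw [if_neg (by omega : ¬ mid + 1 = 1)]; norm_num) (by omega)
      · have hms : s < mid := by
          by_contra h
          exact hsq (by nlinarith)
        simp only [if_neg hsq]
        exact ih lo (mid - 1) res h1 h2 (by omega) hres (by omega)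
    · have hlo : lo = s + 1 := by omega
      subst hlo
      simp only [hpsLoopB, if_neg hle, hres, if_neg (by omega : ¬ s + 1 = 1)]
      norm_num

-- ===== VERDICT (by name: the statement is the Claim_ definition above) =====
theorem highestPerfectSquare_spec : Claim_equal_highestPerfectSquare := by
  intro A _ hA
  unfold Pre_highestPerfectSquare at hA
  unfold Spec_highestPerfectSquare highestPerfectSquare highestPerfectSquare_alt
  set k := Nat.sqrt A.toNat with hk
  set s : Int := (k : Int) with hsdef
  have hA0 : (A.toNat : Int) = A := Int.toNat_of_nonneg (by exact le_trans (by norm_num) hA)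
  have hApos : 0 < A.toNat := by omega
  have hs2 : s ^ 2 ≤ A := by
    have h := Nat.sqrt_le' A.toNat
    have h' : (k : Int) ^ 2 ≤ (A.toNat : Int) := by exact_mod_cast h
    rw [hA0] at h'
    exact h'
  have hAlt : A < (s + 1) ^ 2 := by
    have h := Nat.lt_succ_sqrt' A.toNat
    have h' : (A.toNat : Int) < ((k : Int) + 1) ^ 2 := by exact_mod_cast h
    rw [hA0] at h'
    exact h'
  have hs1 : 1 ≤ s := by
    have h : 0 < k := Nat.sqrt_pos.mpr hApos
    rw [hsdef]
    exact_mod_cast h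
  have hsA : s ≤ A := by nlinarith
  rw [hpsLoopA_run A s hs2 hAlt A.toNat 1 [] none (by omega) (by omega) (by omega),
    hpsLoopB_run A s hs1 hs2 hAlt (A.toNat + 1) 1 A none (by omega) (by omega) hsA
      (by simp) (by omega)]
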